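-- pv_equiv track=rewrite | github.com/Ruhul127/Math-Challenge-Game | Math_Challenge_Game/app.py | format_solution_with_parentheses
-- ===== SOURCE A (Python) =====
-- def format_solution_with_parentheses(solution):
--     """Ensures the solution has proper parentheses formatting for clarity."""
--     try:
--         parts = solution.split('=')
--         if len(parts) != 2:
--             return solution
--
--         equation = parts[0].strip()
--         target = parts[1].strip()
--
--         if '(' in equation or ')' in equation:
--             return solution
--
--         if '*' in equation or '/' in equation:
--             ops = [op for op in equation.split() if op in '+-*/']
--             if len(ops) > 2:
--                 tokens = equation.split()
--                 new_tokens = []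
--                 i = 0
--                 while i < len(tokens):
--                     if tokens[i] in '*/':
--                         if i > 0 and i < len(tokens)-1:
--                             new_tokens[-1] = f"({new_tokens[-1]} {tokens[i]} {tokens[i+1]})"
--                             i += 2
--                         else:
--                             new_tokens.append(tokens[i])
--                             i += 1
--                     else:
--                         new_tokens.append(tokens[i])
--                         i += 1
--                 equation = ' '.join(new_tokens)
--
--         return f"{equation} = {target}"
--     except:
--         return solution
-- ===== SOURCE B (Python) =====
-- def _chain(acc, rest):
--     """Fold a leading */ chain into nested parens, recursively."""
--     if not rest:
--         return [acc]
--     t, rest2 = rest[0], rest[1:]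
--     if t in '*/':
--         if not rest2:
--             return [acc, t]
--         return _chain(f"({acc} {t} {rest2[0]})", rest2[1:])
--     return [acc] + _chain(t, rest2)
--
--
-- def format_solution_with_parentheses(solution):
--     """Ensures the solution has proper parentheses formatting for clarity."""
--     parts = solution.split('=')
--     if len(parts) != 2:
--         return solution
--     equation = parts[0].strip()
--     target = parts[1].strip()
--     if '(' in equation or ')' in equation:
--         return solution
--     if '*' in equation or '/' in equation:
--         tokens = equation.split()
--         if len([op for op in tokens if op in '+-*/']) > 2:
--             equation = ' '.join(_chain(tokens[0], tokens[1:]) if tokens else [])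
--     return f"{equation} = {target}"
-- ===== Notes on version B (the rewrite author's own statement) =====
-- stated objective: simpler
-- what changed: Replaced A's index-mutating while loop (which rewrites new_tokens[-1] in place and advances i by 1 or 2) with a recursive accumulator fold over the token list that carries the last emitted token and folds each */ chain into nested parentheses.
import Mathlib
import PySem

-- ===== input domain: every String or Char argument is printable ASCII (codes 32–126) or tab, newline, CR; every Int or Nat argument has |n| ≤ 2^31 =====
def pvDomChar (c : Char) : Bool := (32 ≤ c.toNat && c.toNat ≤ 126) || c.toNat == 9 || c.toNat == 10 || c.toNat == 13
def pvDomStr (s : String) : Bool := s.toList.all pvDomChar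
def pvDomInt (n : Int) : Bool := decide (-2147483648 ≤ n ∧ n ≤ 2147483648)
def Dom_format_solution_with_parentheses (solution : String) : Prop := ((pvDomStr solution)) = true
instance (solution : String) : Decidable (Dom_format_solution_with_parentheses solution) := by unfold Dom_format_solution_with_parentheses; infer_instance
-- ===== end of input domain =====

-- B replaces A's index-mutating while loop (which rewrites new_tokens[-1]) by a recursive
-- accumulator fold over the token list; objective: simpler. Equivalence of return values only.

-- ===== PORT A =====
-- A's while loop: i is the index, newTokens the accumulator; new_tokens[-1] is read with
-- pyGet? (none = IndexError caught by A's bare `except`, hence the Option result).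
def pvLoopA (tokens : List String) (newTokens : List String) (i : Nat) :
    Option (List String) :=
  if h : i < tokens.length then
    if PySem.Str.isIn tokens[i] "*/" then
      if hc : 0 < i ∧ i < tokens.length - 1 then
        match PySem.List.pyGet? newTokens (-1) with
        | none => none   -- IndexError on new_tokens[-1]
        | some last =>
          have : i + 1 < tokens.length := by omega
          pvLoopA tokens
            (newTokens.dropLast ++ ["(" ++ last ++ " " ++ tokens[i] ++ " " ++ tokens[i+1] ++ ")"])
            (i + 2)
      else pvLoopA tokens (newTokens ++ [tokens[i]]) (i + 1)
    else pvLoopA tokens (newTokens ++ [tokens[i]]) (i + 1)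
  else some newTokens
termination_by tokens.length - i

def format_solution_with_parentheses (solution : String) : String :=
  match PySem.Str.split? solution "=" with
  | none => solution   -- unreachable: the separator "=" is nonempty
  | some parts =>
  if parts.length ≠ 2 then solution
  else
    let equation := PySem.Str.strip parts[0]!
    let target := PySem.Str.strip parts[1]!
    if PySem.Str.isIn "(" equation || PySem.Str.isIn ")" equation then solution
    else
      if PySem.Str.isIn "*" equation || PySem.Str.isIn "/" equation then
        let ops := (PySem.Str.split₀ equation).filter (fun op => PySem.Str.isIn op "+-*/")
        if ops.length > 2 then
          let tokens := PySem.Str.split₀ equation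
          match pvLoopA tokens [] 0 with
          | none => solution   -- exception caught by the bare except
          | some newTokens =>
            PySem.Str.join " " newTokens ++ " = " ++ target
        else equation ++ " = " ++ target
      else equation ++ " = " ++ target

-- ===== PORT B =====
-- B's recursive fold: acc is the last emitted token, still open for grouping.
def pvChainB (acc : String) (rest : List String) : List String :=
  match rest with
  | [] => [acc]
  | t :: rest2 =>
    if PySem.Str.isIn t "*/" then
      if h2 : rest2 = [] then [acc, t]
      else pvChainB ("(" ++ acc ++ " " ++ t ++ " " ++ rest2.head h2 ++ ")") rest2.tail
    else [acc] ++ pvChainB t rest2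
termination_by rest.length
decreasing_by all_goals simp [List.length_tail]

def format_solution_with_parentheses_alt (solution : String) : String :=
  match PySem.Str.split? solution "=" with
  | none => solution   -- unreachable: the separator "=" is nonempty
  | some parts =>
  if parts.length ≠ 2 then solution
  else
    let equation := PySem.Str.strip parts[0]!
    let target := PySem.Str.strip parts[1]!
    if PySem.Str.isIn "(" equation || PySem.Str.isIn ")" equation then solution
    else
      if PySem.Str.isIn "*" equation || PySem.Str.isIn "/" equation then
        let tokens := PySem.Str.split₀ equation
        if (tokens.filter (fun op => PySem.Str.isIn op "+-*/")).length > 2 then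
          let folded := match tokens with
            | [] => []
            | t :: rest => pvChainB t rest
          PySem.Str.join " " folded ++ " = " ++ target
        else equation ++ " = " ++ target
      else equation ++ " = " ++ target

-- ===== PRECONDITION & SPEC =====
def Spec_format_solution_with_parentheses (solution : String) (out : String) : Prop := out = format_solution_with_parentheses_alt solution
instance (solution : String) (out : String) : Decidable (Spec_format_solution_with_parentheses solution out) := by unfold Spec_format_solution_with_parentheses; infer_instance

-- ===== CLAIM (what is proved, stated in full; the proofs are below) =====
def Claim_equal_format_solution_with_parentheses : Prop := ∀ (solution : String), Dom_format_solution_with_parentheses solution → Spec_format_solution_with_parentheses solution (format_solution_with_parentheses solution)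

-- ===== LEMMAS AND PROOFS =====

lemma pvPyGet_neg_one (pre : List String) (last : String) :
    PySem.List.pyGet? (pre ++ [last]) (-1) = some last := by
  simp [PySem.List.pyGet?, PySem.List.pyIdx?]

lemma pvLoopA_eq_chain (tokens : List String) (i : Nat) (hi : 0 < i)
    (hle : i ≤ tokens.length) (pre : List String) (last : String) :
    pvLoopA tokens (pre ++ [last]) i = some (pre ++ pvChainB last (tokens.drop i)) := by
  rw [pvLoopA]
  by_cases h : i < tokens.length
  · have hdrop : tokens.drop i = tokens[i] :: tokens.drop (i + 1) :=
      List.drop_eq_getElem_cons h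
    by_cases hop : PySem.Str.isIn tokens[i] "*/"
    · by_cases hc : 0 < i ∧ i < tokens.length - 1
      · have h1 : i + 1 < tokens.length := by omega
        have hdrop1 : tokens.drop (i + 1) = tokens[i + 1] :: tokens.drop (i + 2) :=
          List.drop_eq_getElem_cons h1
        simp only [dif_pos h, if_pos hop, dif_pos hc, pvPyGet_neg_one,
          List.dropLast_concat]
        rw [pvLoopA_eq_chain tokens (i + 2) (by omega) (by omega) pre
          ("(" ++ last ++ " " ++ tokens[i] ++ " " ++ tokens[i + 1] ++ ")")]
        rw [hdrop, hdrop1]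
        simp only [pvChainB]
        rw [if_pos hop, dif_neg (List.cons_ne_nil _ _)]
        simp
      · have hlast : i = tokens.length - 1 := by omega
        have hdrop1 : tokens.drop (i + 1) = [] := by
          apply List.drop_eq_nil_of_le; omega
        simp only [dif_pos h, if_pos hop, dif_neg hc]
        rw [pvLoopA_eq_chain tokens (i + 1) (by omega) (by omega) (pre ++ [last]) tokens[i]]
        rw [hdrop, hdrop1]
        simp only [pvChainB]
        rw [if_pos hop]
        simp
    · simp only [dif_pos h, if_neg hop]
      rw [pvLoopA_eq_chain tokens (i + 1) (by omega) (by omega) (pre ++ [last]) tokens[i]]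
      rw [hdrop]
      simp only [pvChainB]
      rw [if_neg hop]
      simp
  · simp only [dif_neg h]
    have : i = tokens.length := by omega
    subst this
    simp [pvChainB]
termination_by tokens.length - i

lemma pvLoopA_start (tokens : List String) :
    pvLoopA tokens [] 0 =
      some (match tokens with | [] => [] | t :: rest => pvChainB t rest) := by
  match tokens with
  | [] => rw [pvLoopA]; simp
  | t :: rest =>
    have key : pvLoopA (t :: rest) [t] 1 = some (pvChainB t rest) := by
      simpa using pvLoopA_eq_chain (t :: rest) 1 (by omega) (by simp) [] t
    rw [pvLoopA, dif_pos (by simp : (0:Nat) < (t :: rest).length),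
        dif_neg (by omega : ¬((0:Nat) < 0 ∧ (0:Nat) < (t :: rest).length - 1))]
    simp only [List.getElem_cons_zero, List.nil_append, ite_self]
    exact key

-- ===== VERDICT (by name: the statement is the Claim_ definition above) =====
theorem format_solution_with_parentheses_spec : Claim_equal_format_solution_with_parentheses := by
  intro solution _
  unfold Spec_format_solution_with_parentheses
  unfold format_solution_with_parentheses format_solution_with_parentheses_alt
  simp only [pvLoopA_start]
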